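-- pv_equiv track=rewrite | github.com/WallerTsai/OJ-Solution | leetcode-py/贡献法/No3871.py | countCommas
-- ===== SOURCE A (Python) =====
-- def countCommas(n: int) -> int:
--     if n < 1_000:
--         return 0
--
--     ans = 0
--     cur = 1_000
--     while n >= cur:
--         ans += n - cur + 1
--         cur *= 1_000
--     return ans
-- ===== SOURCE B (Python) =====
-- def countCommas(n: int) -> int:
--     if n < 1_000:
--         return 0
--     k = (len(str(n)) - 1) // 3          # number of comma positions in str(n)
--     return k * (n + 1) - 1000 * (1000 ** k - 1) // 999
-- ===== Notes on version B (the rewrite author's own statement) =====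
-- stated objective: alternative
-- what changed: Replaces the while-loop accumulating n-cur+1 per power of 1000 with a closed form: k = (len(str(n))-1)//3 comma levels, result k*(n+1) - 1000*(1000**k-1)//999.
import Mathlib
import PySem

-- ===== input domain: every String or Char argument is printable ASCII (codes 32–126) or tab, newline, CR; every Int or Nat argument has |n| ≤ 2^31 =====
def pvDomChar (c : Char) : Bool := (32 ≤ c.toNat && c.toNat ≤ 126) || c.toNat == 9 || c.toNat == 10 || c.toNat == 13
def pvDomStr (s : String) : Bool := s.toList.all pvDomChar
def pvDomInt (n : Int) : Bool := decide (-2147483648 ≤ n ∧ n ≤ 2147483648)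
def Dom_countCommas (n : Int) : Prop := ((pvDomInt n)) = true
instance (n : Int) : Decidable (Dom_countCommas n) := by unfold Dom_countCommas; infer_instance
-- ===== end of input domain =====

-- B replaces A's accumulating while-loop over powers of 1000 with a closed-form formula
-- built from the decimal length of n; equivalence is proved on the whole |n| ≤ 2^31 domain.

-- ===== PORT A =====
-- while n >= cur: ans += n - cur + 1; cur *= 1000
-- (the 1 ≤ cur proof argument only justifies termination; cur is always a power of 1000 ≥ 1000)
def countCommasLoop (n cur ans : Int) (hc : 1 ≤ cur) : Int :=
  if n ≥ cur then
    countCommasLoop n (cur * 1000) (ans + (n - cur + 1)) (by nlinarith)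
  else ans
termination_by (n + 1 - cur).toNat
decreasing_by
  have : cur * 1000 ≥ cur + 999 := by nlinarith
  omega

def countCommas (n : Int) : Int :=
  if n < 1000 then 0
  else countCommasLoop n 1000 0 (by norm_num)

-- ===== PORT B =====
-- k = (len(str(n)) - 1) // 3; here k ≥ 1 (n ≥ 1000), so 1000 ** k is 1000 ^ k.toNat
def countCommas_alt (n : Int) : Int :=
  if n < 1000 then 0
  else
    let k := PySem.Int.floordiv (PySem.Str.len (PySem.Int.toStr n) - 1) 3
    k * (n + 1) - PySem.Int.floordiv (1000 * (1000 ^ k.toNat - 1)) 999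

-- ===== PRECONDITION & SPEC =====
def Spec_countCommas (n : Int) (out : Int) : Prop := out = countCommas_alt n
instance (n : Int) (out : Int) : Decidable (Spec_countCommas n out) := by unfold Spec_countCommas; infer_instance

-- ===== CLAIM (what is proved, stated in full; the proofs are below) =====
def Claim_equal_countCommas : Prop := ∀ (n : Int), Dom_countCommas n → Spec_countCommas n (countCommas n)

-- ===== LEMMAS AND PROOFS =====

-- lower bound companion to Mathlib's Nat.toDigitsCore_length
lemma lt_pow_toDigitsCore_length (b : Nat) (hb : 2 ≤ b) :
    ∀ (f n : Nat), n < b ^ f → n < b ^ (Nat.toDigitsCore b f n []).length := by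
  intro f
  induction f with
  | zero => intro n h; simpa [Nat.toDigitsCore] using h
  | succ f ih =>
    intro n h
    simp only [Nat.toDigitsCore]
    by_cases hx : n / b = 0
    · simp only [hx, if_true, List.length]
      have : n < b := Nat.lt_of_div_eq_zero (by omega) hx
      simpa using this
    · simp only [hx, if_false]
      rw [Nat.toDigitsCore_lens_eq]
      have hdiv : n / b < b ^ f := Nat.nat_repr_len_aux n b f (by omega) h
      have h2 := ih (n / b) hdiv
      calc n < (n / b + 1) * b := by
                have hm : n % b < b := Nat.mod_lt _ (by omega)
                have hd : b * (n / b) + n % b = n := Nat.div_add_mod n b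
                nlinarith
           _ ≤ b ^ (Nat.toDigitsCore b f (n / b) []).length * b := by
                exact Nat.mul_le_mul_right b h2
           _ = b ^ ((Nat.toDigitsCore b f (n / b) []).length + 1) := by ring

lemma lt_pow_toDigits_length (n : Nat) : n < 10 ^ (Nat.toDigits 10 n).length := by
  have h : n < 10 ^ (n + 1) := by
    calc n < 2 ^ (n + 1) := by
            exact lt_of_lt_of_le (Nat.lt_two_pow_self) (Nat.pow_le_pow_right (by norm_num) (by omega))
         _ ≤ 10 ^ (n + 1) := Nat.pow_le_pow_left (by norm_num) _
  exact lt_pow_toDigitsCore_length 10 (by norm_num) (n + 1) n h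

-- decimal length of a positive n pinned between powers of 10
lemma toDigits_length_bounds (n lo hi : Nat) (hlo : 10 ^ lo ≤ n) (hhi : n < 10 ^ hi)
    (hhip : 0 < hi) :
    lo < (Nat.toDigits 10 n).length ∧ (Nat.toDigits 10 n).length ≤ hi := by
  constructor
  · by_contra h
    rw [not_lt] at h
    have := lt_pow_toDigits_length n
    have : n < 10 ^ lo := lt_of_lt_of_le this (Nat.pow_le_pow_right (by norm_num) h)
    omega
  · exact Nat.toDigits_length 10 n hi hhip hhi

lemma strlen_toStr (n : Int) (hn : 0 ≤ n) :
    PySem.Str.len (PySem.Int.toStr n) = ((Nat.toDigits 10 n.toNat).length : Int) := by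
  simp [PySem.Str.len, PySem.Int.toList_toStr, PySem.Int.toChars, not_lt.mpr hn]

-- B's k equals K on an interval [10^(3K), 10^(3K+3))
lemma alt_k_eq (n : Int) (K : Nat) (h1 : (10:Int) ^ (3 * K) ≤ n) (h2 : n < (10:Int) ^ (3 * K + 3)) :
    PySem.Int.floordiv (PySem.Str.len (PySem.Int.toStr n) - 1) 3 = (K : Int) := by
  have hn : 0 ≤ n := le_trans (by positivity) h1
  have hc1 : ((10 ^ (3 * K) : Nat) : Int) = (10:Int) ^ (3 * K) := by push_cast; ring
  have hc2 : ((10 ^ (3 * K + 3) : Nat) : Int) = (10:Int) ^ (3 * K + 3) := by push_cast; ring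
  have hlo : 10 ^ (3 * K) ≤ n.toNat := by omega
  have hhi : n.toNat < 10 ^ (3 * K + 3) := by omega
  obtain ⟨hL1, hL2⟩ := toDigits_length_bounds n.toNat (3 * K) (3 * K + 3) hlo hhi (by omega)
  rw [strlen_toStr n hn]
  rw [PySem.Int.floordiv_eq_iff_of_pos (by norm_num)]
  constructor <;> omega

-- unfolding A's loop one step
lemma loop_step (n cur cur' ans : Int) (hc : 1 ≤ cur) (h : n ≥ cur) (hcur' : cur' = cur * 1000) :
    countCommasLoop n cur ans hc
      = countCommasLoop n cur' (ans + (n - cur + 1)) (by subst hcur'; nlinarith) := by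
  subst hcur'; rw [countCommasLoop]; simp [h]

lemma loop_stop (n cur ans : Int) (hc : 1 ≤ cur) (h : ¬ n ≥ cur) :
    countCommasLoop n cur ans hc = ans := by
  rw [countCommasLoop]; simp [h]

-- ===== VERDICT (by name: the statement is the Claim_ definition above) =====
theorem countCommas_spec : Claim_equal_countCommas := by
  intro n hdom
  unfold Spec_countCommas countCommas countCommas_alt
  unfold Dom_countCommas pvDomInt at hdom
  have hdom' : -2147483648 ≤ n ∧ n ≤ 2147483648 := by simpa using hdom
  by_cases hsmall : n < 1000
  · simp [hsmall]
  · simp only [hsmall, if_false]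
    rw [not_lt] at hsmall
    by_cases h6 : n < 1000000
    · -- K = 1
      have hk := alt_k_eq n 1 (by norm_num; omega) (by norm_num; omega)
      rw [hk]
      rw [loop_step n 1000 1000000 0 (by norm_num) (by omega) (by norm_num),
          loop_stop n 1000000 _ (by norm_num) (by omega)]
      simp only [Int.toNat_natCast]
      norm_num [PySem.Int.floordiv, Int.fdiv]
      omega
    · rw [not_lt] at h6
      by_cases h9 : n < 1000000000
      · -- K = 2
        have hk := alt_k_eq n 2 (by norm_num; omega) (by norm_num; omega)
        rw [hk]
        rw [loop_step n 1000 1000000 0 (by norm_num) (by omega) (by norm_num),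
            loop_step n 1000000 1000000000 _ (by norm_num) (by omega) (by norm_num),
            loop_stop n 1000000000 _ (by norm_num) (by omega)]
        simp only [Int.toNat_natCast]
        norm_num [PySem.Int.floordiv, Int.fdiv]
        omega
      · -- K = 3 (n ≤ 2^31 < 10^12)
        rw [not_lt] at h9
        have hk := alt_k_eq n 3 (by norm_num; omega) (by norm_num; omega)
        rw [hk]
        rw [loop_step n 1000 1000000 0 (by norm_num) (by omega) (by norm_num),
            loop_step n 1000000 1000000000 _ (by norm_num) (by omega) (by norm_num),
            loop_step n 1000000000 1000000000000 _ (by norm_num) (by omega) (by norm_num),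
            loop_stop n 1000000000000 _ (by norm_num) (by omega)]
        simp only [Int.toNat_natCast]
        norm_num [PySem.Int.floordiv, Int.fdiv]
        omega
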